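-- pv_equiv track=rewrite | github.com/Oz-LS/CompouNdex | services/hydration_service.py | _to_hill
-- ===== SOURCE A (Python) =====
-- def _to_hill(elements: dict[str, int]) -> str:
--     """
--     Convert element dict to Hill notation string.
--     Hill convention:
--       - If C present: C first, H second, then others alphabetically.
--       - If no C: all elements alphabetically (H treated like any other).
--     """
--     elems = dict(elements)
--     result = ""
--     if "C" in elems:
--         for el in ("C", "H"):
--             if el in elems:
--                 cnt = elems.pop(el)
--                 result += el + (str(cnt) if cnt > 1 else "")
--     for el in sorted(elems):
--         cnt = elems[el]
--         result += el + (str(cnt) if cnt > 1 else "")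
--     return result
-- ===== SOURCE B (Python) =====
-- def _to_hill(elements: dict[str, int]) -> str:
--     has_c = "C" in elements
--
--     def key(el: str) -> str:
--         tier = "0" if el == "C" else ("1" if el == "H" and has_c else "2")
--         return tier + el
--
--     return "".join(el + (str(cnt) if cnt > 1 else "")
--                    for el, cnt in sorted(elements.items(), key=lambda kv: key(kv[0])))
-- ===== Notes on version B (the rewrite author's own statement) =====
-- stated objective: idiomatic
-- what changed: Replaces A's staged special-casing (pop C/H from a copied dict with a string accumulator, then a second sorted loop over the remainder) by a single sorted() call with a composite tier+symbol key followed by one join over the formatted items.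
import Mathlib
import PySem

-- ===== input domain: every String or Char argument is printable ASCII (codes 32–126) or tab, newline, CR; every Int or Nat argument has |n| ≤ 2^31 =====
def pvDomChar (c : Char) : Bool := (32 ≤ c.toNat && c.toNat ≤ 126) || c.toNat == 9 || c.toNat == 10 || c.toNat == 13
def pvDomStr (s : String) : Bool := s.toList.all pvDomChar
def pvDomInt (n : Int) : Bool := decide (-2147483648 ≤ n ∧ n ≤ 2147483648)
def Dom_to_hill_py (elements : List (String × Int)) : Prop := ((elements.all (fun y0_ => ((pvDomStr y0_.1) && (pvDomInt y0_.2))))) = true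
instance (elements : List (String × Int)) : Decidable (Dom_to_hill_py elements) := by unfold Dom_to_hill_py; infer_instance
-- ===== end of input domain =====

-- B replaces A's staged pop-C/H loop plus second sorted loop by one sorted() call with a
-- composite tier+symbol key and a single join (idiomatic decomposition; same asymptotic cost).

-- ===== PORT A =====
def to_hill_py (elements : List (String × Int)) : String :=
  let elems := PySem.Dict.ofList elements          -- elems = dict(elements)
  let result : String := ""
  let st :=
    if elems.contains "C" then
      (["C", "H"]).foldl
        (fun (st : PySem.Dict String Int × String) el =>
          if st.1.contains el then
            match st.1.pop? el with                -- cnt = elems.pop(el)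
            | some (cnt, d') => (d', st.2 ++ (el ++ (if cnt > 1 then PySem.Int.toStr cnt else "")))
            | none => st                           -- unreachable: guarded by contains
          else st)
        (elems, result)
    else (elems, result)
  (PySem.List.sorted st.1.keys (fun k => k)).foldl
    (fun result el =>
      let cnt := st.1.getD el 0                    -- el ∈ keys, so Python's elems[el] is exactly this
      result ++ (el ++ (if cnt > 1 then PySem.Int.toStr cnt else "")))
    st.2

-- ===== PORT B =====
def hillKey_alt (hasC : Bool) (el : String) : String :=
  (if el == "C" then "0" else if el == "H" && hasC then "1" else "2") ++ el

def to_hill_py_alt (elements : List (String × Int)) : String :=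
  let elems := PySem.Dict.ofList elements
  let hasC := elems.contains "C"
  PySem.Str.join ""
    ((PySem.List.sorted elems.items (fun kv => hillKey_alt hasC kv.1)).map
      (fun kv => kv.1 ++ (if kv.2 > 1 then PySem.Int.toStr kv.2 else "")))

-- ===== PRECONDITION & SPEC =====
def Spec_to_hill_py (elements : List (String × Int)) (out : String) : Prop := out = to_hill_py_alt elements
instance (elements : List (String × Int)) (out : String) : Decidable (Spec_to_hill_py elements out) := by unfold Spec_to_hill_py; infer_instance

-- ===== CLAIM (what is proved, stated in full; the proofs are below) =====
def Claim_equal_to_hill_py : Prop := ∀ (elements : List (String × Int)), Dom_to_hill_py elements → Spec_to_hill_py elements (to_hill_py elements)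

-- ===== LEMMAS AND PROOFS =====

def pvFmt (kv : String × Int) : String := kv.1 ++ (if kv.2 > 1 then PySem.Int.toStr kv.2 else "")

theorem pvJoin_nil : PySem.Str.join "" [] = "" := by
  simp [PySem.Str.join, PySem.Chars.join, List.intercalate]

theorem pvIntercalate_nil (ys : List (List Char)) : List.intercalate ([] : List Char) ys = ys.flatten := by
  simp only [List.intercalate]
  induction ys with
  | nil => simp
  | cons a t ih => cases t <;> simp_all [List.intersperse]

theorem pvJoin_cons (x : String) (xs : List String) :
    PySem.Str.join "" (x :: xs) = x ++ PySem.Str.join "" xs := by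
  simp [PySem.Str.join, PySem.Chars.join, pvIntercalate_nil]

theorem pvFoldl_fmt (l : List (String × Int)) (init : String) :
    l.foldl (fun r kv => r ++ pvFmt kv) init = init ++ PySem.Str.join "" (l.map pvFmt) := by
  induction l generalizing init with
  | nil => simp [pvJoin_nil]
  | cons a t ih => simp [ih, pvJoin_cons, String.append_assoc]

-- list-char lexicographic order: common prefix / smaller head
theorem pvListLt_append (t l1 l2 : List Char) (h : l1 < l2) : t ++ l1 < t ++ l2 := by
  induction t with
  | nil => simpa
  | cons c t ih => exact List.cons_lt_cons_iff.2 (Or.inr ⟨rfl, ih⟩)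

theorem pvStrLt_append (t a b : String) (h : a < b) : t ++ a < t ++ b := by
  rw [String.lt_iff_toList_lt] at *
  simpa [String.toList_append] using pvListLt_append t.toList _ _ h

theorem pvStrLt_head (c1 c2 : Char) (h : c1 < c2) (p q a b : String)
    (hp : p.toList = [c1]) (hq : q.toList = [c2]) : p ++ a < q ++ b := by
  rw [String.lt_iff_toList_lt, String.toList_append, String.toList_append, hp, hq]
  exact List.cons_lt_cons_iff.2 (Or.inl h)

-- Dict item-level facts about erase
theorem pvFind?_filter_ne (l : List (String × Int)) (k k' : String) (h : k' ≠ k) :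
    (l.filter (fun p => !(p.1 == k))).find? (fun p => p.1 == k') = l.find? (fun p => p.1 == k') := by
  induction l with
  | nil => simp
  | cons a t ih =>
    by_cases hk : a.1 = k
    · have h1 : (k == k') = false := by simp [Ne.symm h]
      simp [hk, h1, ih]
    · by_cases hk' : a.1 = k'
      · simp [hk', h]
      · simp [hk, hk', ih]

theorem pvGet?_erase (d : PySem.Dict String Int) (k k' : String) (h : k' ≠ k) :
    (d.erase k).get? k' = d.get? k' := by
  simp [PySem.Dict.get?, PySem.Dict.erase, pvFind?_filter_ne _ _ _ h]

theorem pvGetD_erase (d : PySem.Dict String Int) (k k' : String) (h : k' ≠ k) :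
    (d.erase k).getD k' 0 = d.getD k' 0 := by
  rw [PySem.Dict.getD_eq_get?_getD, PySem.Dict.getD_eq_get?_getD, pvGet?_erase _ _ _ h]

theorem pvContains_erase (d : PySem.Dict String Int) (k k' : String) (h : k' ≠ k) :
    (d.erase k).contains k' = d.contains k' := by
  rw [PySem.Dict.contains_eq_isSome_get?, PySem.Dict.contains_eq_isSome_get?, pvGet?_erase _ _ _ h]

theorem pvMapFst_filter (l : List (String × Int)) (k : String) :
    ((l.filter (fun p => !(p.1 == k))).map Prod.fst) = (l.map Prod.fst).filter (fun x => !(x == k)) := by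
  induction l with
  | nil => simp
  | cons a t ih => by_cases hk : a.1 = k <;> simp [hk, ih]

theorem pvKeys_erase (d : PySem.Dict String Int) (k : String) (hnd : d.keys.Nodup) :
    (d.erase k).keys = d.keys.erase k := by
  rw [hnd.erase_eq_filter]
  simpa [PySem.Dict.keys, PySem.Dict.erase, bne] using pvMapFst_filter d.items k

theorem pvPop?_eq (d : PySem.Dict String Int) (k : String) (v : Int) (h : d.get? k = some v) :
    d.pop? k = some (v, d.erase k) := by
  simp [PySem.Dict.pop?, h]

-- strictly increasing key list from sortedness + nodup
theorem pvSorted_pairwise_lt (l : List String) (hnd : l.Nodup) :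
    (PySem.List.sorted l (fun k => k)).Pairwise (· < ·) := by
  have h1 := PySem.List.sorted_pairwise l (fun k => k)
  have h2 : (PySem.List.sorted l (fun k => k)).Nodup :=
    ((PySem.List.sorted_perm l (fun k => k) false).nodup_iff).2 hnd
  exact (h1.and h2).imp (fun h => lt_of_le_of_ne h.1 h.2)

theorem pvToList0 : ("0" : String).toList = ['0'] := rfl
theorem pvToList1 : ("1" : String).toList = ['1'] := rfl
theorem pvToList2 : ("2" : String).toList = ['2'] := rfl

-- hillKey on a non-C, and (when C present) non-H symbol is "2" ++ k
theorem pvHillKey_other (hasC : Bool) (k : String) (hkC : k ≠ "C") (hkH : hasC = true → k ≠ "H") :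
    hillKey_alt hasC k = "2" ++ k := by
  unfold hillKey_alt
  cases hasC with
  | false => simp [hkC]
  | true => simp [hkC, hkH rfl]

-- the ordered tail: sorted keys mapped to their items, strictly key-increasing
theorem pvTail_pairwise (hasC : Bool) (d : PySem.Dict String Int) (l : List String) (hnd : l.Nodup)
    (hmem : ∀ k ∈ l, k ≠ "C" ∧ (hasC = true → k ≠ "H")) :
    ((PySem.List.sorted l (fun k => k)).map (fun k => (k, d.getD k 0))).Pairwise
      (fun a b => hillKey_alt hasC a.1 < hillKey_alt hasC b.1) := by
  rw [List.pairwise_map]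
  refine (pvSorted_pairwise_lt l hnd).imp_of_mem ?_
  intro a b ha hb hab
  have hma := hmem a ((PySem.List.mem_sorted l (fun k => k) false a).1 ha)
  have hmb := hmem b ((PySem.List.mem_sorted l (fun k => k) false b).1 hb)
  rw [pvHillKey_other hasC a hma.1 hma.2, pvHillKey_other hasC b hmb.1 hmb.2]
  exact pvStrLt_append _ _ _ hab

-- proof-only restatements of the two port bodies (definitionally equal to them)
def pvLoop1 (d : PySem.Dict String Int) : PySem.Dict String Int × String :=
  if d.contains "C" then
    (["C", "H"]).foldl
      (fun (st : PySem.Dict String Int × String) el =>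
        if st.1.contains el then
          match st.1.pop? el with
          | some (cnt, d') => (d', st.2 ++ (el ++ (if cnt > 1 then PySem.Int.toStr cnt else "")))
          | none => st
        else st)
      (d, "")
  else (d, "")

def pvA (d : PySem.Dict String Int) : String :=
  (PySem.List.sorted (pvLoop1 d).1.keys (fun k => k)).foldl
    (fun r el => r ++ pvFmt (el, (pvLoop1 d).1.getD el 0)) (pvLoop1 d).2

def pvB (d : PySem.Dict String Int) : String :=
  PySem.Str.join ""
    ((PySem.List.sorted d.items (fun kv => hillKey_alt (d.contains "C") kv.1)).map pvFmt)

-- A's tail loop, as a join over the remaining dict's sorted items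
theorem pvTailFold (e : PySem.Dict String Int) (init : String) :
    (PySem.List.sorted e.keys (fun k => k)).foldl
      (fun r el => r ++ pvFmt (el, e.getD el 0)) init
    = init ++ PySem.Str.join ""
        (((PySem.List.sorted e.keys (fun k => k)).map (fun k => (k, e.getD k 0))).map pvFmt) := by
  rw [← pvFoldl_fmt, List.foldl_map]

theorem pvCore (d : PySem.Dict String Int) (hnd : d.keys.Nodup) : pvA d = pvB d := by
  by_cases hC : "C" ∈ d.keys
  · -- carbon present: C first, H (if present) second, then the rest alphabetically
    have hCb : d.contains "C" = true := by
      rw [PySem.Dict.contains_eq_decide_mem_keys]; simp [hC]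
    obtain ⟨vC, hvC⟩ : ∃ v, d.get? "C" = some v := by
      have h := PySem.Dict.contains_eq_isSome_get? d "C"
      rw [hCb] at h; exact Option.isSome_iff_exists.1 h.symm
    have hgC : d.getD "C" 0 = vC := PySem.Dict.getD_of_get?_eq_some d 0 hvC
    have hpopC := pvPop?_eq d "C" vC hvC
    have hk1 : (d.erase "C").keys = d.keys.erase "C" := pvKeys_erase d "C" hnd
    have hnd1 : (d.erase "C").keys.Nodup := by rw [hk1]; exact hnd.erase _
    have hitems := PySem.Dict.items_eq_map_keys d hnd 0
    have hKeyC : hillKey_alt true "C" = "0" ++ "C" := by simp [hillKey_alt]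
    have hKeyH : hillKey_alt true "H" = "1" ++ "H" := by simp [hillKey_alt]
    by_cases hH : "H" ∈ d.keys
    · -- H present too
      have hH1 : "H" ∈ d.keys.erase "C" := hnd.mem_erase_iff.2 ⟨by simp, hH⟩
      have hH1' : "H" ∈ (d.erase "C").keys := by rw [hk1]; exact hH1
      have hH1b : (d.erase "C").contains "H" = true := by
        rw [PySem.Dict.contains_eq_decide_mem_keys]; simp [hH1']
      obtain ⟨vH, hvH1⟩ : ∃ v, (d.erase "C").get? "H" = some v := by
        have h := PySem.Dict.contains_eq_isSome_get? (d.erase "C") "H"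
        rw [hH1b] at h; exact Option.isSome_iff_exists.1 h.symm
      have hvH : d.get? "H" = some vH := by
        rw [← pvGet?_erase d "C" "H" (by simp)]; exact hvH1
      have hgH : d.getD "H" 0 = vH := PySem.Dict.getD_of_get?_eq_some d 0 hvH
      have hpopH := pvPop?_eq (d.erase "C") "H" vH hvH1
      have hk2 : ((d.erase "C").erase "H").keys = (d.keys.erase "C").erase "H" := by
        rw [pvKeys_erase _ _ hnd1, hk1]
      have hnd2 : ((d.erase "C").erase "H").keys.Nodup := by
        rw [hk2]; exact (hnd.erase _).erase _
      have hloop : pvLoop1 d = ((d.erase "C").erase "H",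
          ("" ++ pvFmt ("C", vC)) ++ pvFmt ("H", vH)) := by
        simp [pvLoop1, hCb, hpopC, hH1b, hpopH, pvFmt]
      have hmemk : ∀ k ∈ PySem.List.sorted ((d.erase "C").erase "H").keys (fun k => k),
          k ≠ "C" ∧ k ≠ "H" := by
        intro k hk
        have hk' := (PySem.List.mem_sorted _ _ _ _).1 hk
        rw [hk2] at hk'
        have h2 := (hnd.erase "C").mem_erase_iff.1 hk'
        have h3 := hnd.mem_erase_iff.1 h2.2
        exact ⟨h3.1, h2.1⟩
      have htail : (PySem.List.sorted ((d.erase "C").erase "H").keys (fun k => k)).map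
            (fun k => (k, ((d.erase "C").erase "H").getD k 0))
          = (PySem.List.sorted ((d.erase "C").erase "H").keys (fun k => k)).map
            (fun k => (k, d.getD k 0)) := by
        apply List.map_congr_left
        intro k hk
        have h := hmemk k hk
        rw [pvGetD_erase _ _ _ h.2, pvGetD_erase _ _ _ h.1]
      have hkeysperm : d.keys.Perm
          ("C" :: "H" :: PySem.List.sorted ((d.erase "C").erase "H").keys (fun k => k)) := by
        refine (List.perm_cons_erase hC).trans (List.Perm.cons _ ?_)
        refine (List.perm_cons_erase hH1).trans (List.Perm.cons _ ?_)
        rw [← hk2]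
        exact (PySem.List.sorted_perm ((d.erase "C").erase "H").keys (fun k => k) false).symm
      have hperm : (("C", vC) :: ("H", vH) ::
          (PySem.List.sorted ((d.erase "C").erase "H").keys (fun k => k)).map
            (fun k => (k, d.getD k 0))).Perm d.items := by
        rw [hitems]
        have h := (hkeysperm.map (fun k => (k, d.getD k 0))).symm
        simpa [hgC, hgH] using h
      have hpair : (("C", vC) :: ("H", vH) ::
          (PySem.List.sorted ((d.erase "C").erase "H").keys (fun k => k)).map
            (fun k => (k, d.getD k 0))).Pairwise
          (fun a b => hillKey_alt true a.1 < hillKey_alt true b.1) := by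
        refine List.Pairwise.cons ?_ (List.Pairwise.cons ?_ ?_)
        · intro x hx
          rcases List.mem_cons.1 hx with rfl | hx
          · rw [hKeyC, hKeyH]
            exact pvStrLt_head '0' '1' (by decide) _ _ _ _ pvToList0 pvToList1
          · obtain ⟨k, hk, rfl⟩ := List.mem_map.1 hx
            have h := hmemk k hk
            rw [hKeyC, pvHillKey_other true k h.1 (fun _ => h.2)]
            exact pvStrLt_head '0' '2' (by decide) _ _ _ _ pvToList0 pvToList2
        · intro x hx
          obtain ⟨k, hk, rfl⟩ := List.mem_map.1 hx
          have h := hmemk k hk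
          rw [hKeyH, pvHillKey_other true k h.1 (fun _ => h.2)]
          exact pvStrLt_head '1' '2' (by decide) _ _ _ _ pvToList1 pvToList2
        · exact pvTail_pairwise true d ((d.erase "C").erase "H").keys hnd2
            (fun k hk => by
              have hs : k ∈ PySem.List.sorted ((d.erase "C").erase "H").keys (fun k => k) :=
                (PySem.List.mem_sorted _ _ _ _).2 hk
              exact ⟨(hmemk k hs).1, fun _ => (hmemk k hs).2⟩)
      have hsorted := PySem.List.sorted_eq_of_perm_of_pairwise_lt d.items _
        (fun kv => hillKey_alt true kv.1) hperm hpair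
      unfold pvA pvB
      rw [hCb, hloop, hsorted]
      rw [pvTailFold, htail]
      simp [pvJoin_cons, String.append_assoc]
    · -- C but no H
      have hHb : d.contains "H" = false := by
        rw [PySem.Dict.contains_eq_decide_mem_keys]; simp [hH]
      have hH1b : (d.erase "C").contains "H" = false := by
        rw [pvContains_erase d "C" "H" (by simp), hHb]
      have hloop : pvLoop1 d = (d.erase "C", "" ++ pvFmt ("C", vC)) := by
        simp [pvLoop1, hCb, hpopC, hH1b, pvFmt]
      have hmemk : ∀ k ∈ PySem.List.sorted (d.erase "C").keys (fun k => k),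
          k ≠ "C" ∧ k ≠ "H" := by
        intro k hk
        have hk' := (PySem.List.mem_sorted _ _ _ _).1 hk
        rw [hk1] at hk'
        have h3 := hnd.mem_erase_iff.1 hk'
        exact ⟨h3.1, fun hkh => hH (hkh ▸ h3.2)⟩
      have htail : (PySem.List.sorted (d.erase "C").keys (fun k => k)).map
            (fun k => (k, (d.erase "C").getD k 0))
          = (PySem.List.sorted (d.erase "C").keys (fun k => k)).map
            (fun k => (k, d.getD k 0)) := by
        apply List.map_congr_left
        intro k hk
        rw [pvGetD_erase _ _ _ (hmemk k hk).1]
      have hkeysperm : d.keys.Perm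
          ("C" :: PySem.List.sorted (d.erase "C").keys (fun k => k)) := by
        refine (List.perm_cons_erase hC).trans (List.Perm.cons _ ?_)
        rw [← hk1]
        exact (PySem.List.sorted_perm (d.erase "C").keys (fun k => k) false).symm
      have hperm : (("C", vC) ::
          (PySem.List.sorted (d.erase "C").keys (fun k => k)).map
            (fun k => (k, d.getD k 0))).Perm d.items := by
        rw [hitems]
        have h := (hkeysperm.map (fun k => (k, d.getD k 0))).symm
        simpa [hgC] using h
      have hpair : (("C", vC) ::
          (PySem.List.sorted (d.erase "C").keys (fun k => k)).map
            (fun k => (k, d.getD k 0))).Pairwise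
          (fun a b => hillKey_alt true a.1 < hillKey_alt true b.1) := by
        refine List.Pairwise.cons ?_ ?_
        · intro x hx
          obtain ⟨k, hk, rfl⟩ := List.mem_map.1 hx
          have h := hmemk k hk
          rw [hKeyC, pvHillKey_other true k h.1 (fun _ => h.2)]
          exact pvStrLt_head '0' '2' (by decide) _ _ _ _ pvToList0 pvToList2
        · exact pvTail_pairwise true d (d.erase "C").keys hnd1
            (fun k hk => by
              have hs : k ∈ PySem.List.sorted (d.erase "C").keys (fun k => k) :=
                (PySem.List.mem_sorted _ _ _ _).2 hk
              exact ⟨(hmemk k hs).1, fun _ => (hmemk k hs).2⟩)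
      have hsorted := PySem.List.sorted_eq_of_perm_of_pairwise_lt d.items _
        (fun kv => hillKey_alt true kv.1) hperm hpair
      unfold pvA pvB
      rw [hCb, hloop, hsorted]
      rw [pvTailFold, htail]
      simp [pvJoin_cons]
  · -- no carbon: one plain alphabetical pass on both sides
    have hCb : d.contains "C" = false := by
      rw [PySem.Dict.contains_eq_decide_mem_keys]; simp [hC]
    have hitems := PySem.Dict.items_eq_map_keys d hnd 0
    have hperm : ((PySem.List.sorted d.keys (fun k => k)).map
        (fun k => (k, d.getD k 0))).Perm d.items := by
      rw [hitems]; exact (PySem.List.sorted_perm d.keys (fun k => k) false).map _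
    have hpair := pvTail_pairwise (d.contains "C") d d.keys hnd
      (fun k hk => ⟨fun hkc => hC (hkc ▸ hk), fun ht => absurd ht (by simp [hCb])⟩)
    have hsorted := PySem.List.sorted_eq_of_perm_of_pairwise_lt d.items
      ((PySem.List.sorted d.keys (fun k => k)).map (fun k => (k, d.getD k 0)))
      (fun kv => hillKey_alt (d.contains "C") kv.1) hperm hpair
    have hloop : pvLoop1 d = (d, "") := by simp [pvLoop1, hCb]
    rw [pvA, pvB, hsorted, hloop, pvTailFold]
    simp

-- main equivalence
theorem pvMain (elements : List (String × Int)) : to_hill_py elements = to_hill_py_alt elements := by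
  unfold to_hill_py to_hill_py_alt
  exact pvCore (PySem.Dict.ofList elements) (PySem.Dict.nodup_keys_ofList elements)

-- ===== VERDICT (by name: the statement is the Claim_ definition above) =====
theorem to_hill_py_spec : Claim_equal_to_hill_py := by
  intro elements _
  unfold Spec_to_hill_py
  exact pvMain elements
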